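-- pv_equiv track=rewrite | github.com/Rayvivek881/python_django | algorithum/NonReaptingSubStringWithUniqueChareter.py | distinctSubstring
-- ===== SOURCE A (Python) =====
-- def distinctSubstring(P):
--     S, N = dict(), len(P)
--     for i in range(N):
--         freq = [False] * 26
--         s = ""
--         for j in range(i, N):
--             pos = ord(P[j]) - ord('a')
--             if freq[pos]:
--                 break
--             freq[pos] = True
--             s += P[j]
--             S[s] = 1
--     return len(S), S
-- ===== SOURCE B (Python) =====
-- def distinctSubstring(P):
--     N = len(P)
--     seen = [N] * 26          # next occurrence (to the right) of each letter slot
--     ends = [0] * N           # ends[i] = exclusive end of the maximal distinct window starting at i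
--     e = N
--     for i in range(N - 1, -1, -1):
--         pos = ord(P[i]) - ord('a')
--         e = min(e, seen[pos])
--         ends[i] = e
--         seen[pos] = i
--     S = dict()
--     for i in range(N):
--         for j in range(i + 1, ends[i] + 1):
--             S[P[i:j]] = 1
--     return len(S), S
-- ===== Notes on version B (the rewrite author's own statement) =====
-- stated objective: alternative
-- what changed: A restarts a bounded duplicate-check scan at every start index; B makes one backward pass maintaining next-occurrence positions per letter slot to precompute each start's maximal distinct-window end, then a simple forward emission of the substrings.
import Mathlib
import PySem

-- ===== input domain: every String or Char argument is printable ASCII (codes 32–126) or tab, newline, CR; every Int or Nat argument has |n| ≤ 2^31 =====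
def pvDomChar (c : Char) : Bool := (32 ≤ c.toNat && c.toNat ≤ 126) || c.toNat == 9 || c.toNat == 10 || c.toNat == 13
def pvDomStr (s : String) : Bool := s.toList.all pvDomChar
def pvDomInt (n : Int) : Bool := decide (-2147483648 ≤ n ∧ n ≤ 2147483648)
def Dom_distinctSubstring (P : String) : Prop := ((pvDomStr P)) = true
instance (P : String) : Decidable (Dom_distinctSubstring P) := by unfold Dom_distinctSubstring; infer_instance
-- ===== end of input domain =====

-- B replaces A's restart-from-every-start scan by one backward pass that precomputes, for every
-- start, the exclusive end of its maximal distinct-slot window (via next-occurrence slots),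
-- then emits the same substrings in the same order; same asymptotic cost (output-bound), objective: alternative.

-- ===== PORT A =====
-- inner 'for j in range(i, N): … break …' of A as structural recursion on N - j;
-- freq[pos] / freq[pos] = True use pyGetD/pySetD: Pre_ keeps every character code in [71,122],
-- exactly where Python's possibly-negative index pos does not raise IndexError.
def pvAinner (L : List Char) (N j : Nat) (freq : List Bool) (s : List Char)
    (S : PySem.Dict String Int) : PySem.Dict String Int :=
  if _h : j < N then
    let c := PySem.List.pyGetD L (j : Int) ' '
    let pos : Int := (c.toNat : Int) - 97
    if PySem.List.pyGetD freq pos false then S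
    else pvAinner L N (j + 1) (PySem.List.pySetD freq pos true) (s ++ [c])
      (S.insert (String.ofList (s ++ [c])) 1)
  else S
termination_by N - j

def distinctSubstring (P : String) : Int × (List (String × Int)) :=
  let L := P.toList
  let N := L.length
  let S := (List.range N).foldl
    (fun S i => pvAinner L N i (List.replicate 26 false) [] S) PySem.Dict.empty
  ((S.size : Int), S.items)

-- ===== PORT B =====
-- backward pass 'for i in range(N-1, -1, -1)' of B as structural recursion on k = i+1;
-- ends[i] = e is realised by prepending (every cell is written exactly once, in order N-1 … 0).
def pvBback (L : List Char) (k : Nat) (seen : List Int) (e : Int) (ends : List Int) : List Int :=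
  match k with
  | 0 => ends
  | Nat.succ i =>
    let c := PySem.List.pyGetD L (i : Int) ' '
    let pos : Int := (c.toNat : Int) - 97
    let e' := min e (PySem.List.pyGetD seen pos 0)
    pvBback L i (PySem.List.pySetD seen pos (i : Int)) e' (e' :: ends)

def distinctSubstring_alt (P : String) : Int × (List (String × Int)) :=
  let L := P.toList
  let N := L.length
  let ends := pvBback L N (List.replicate 26 (N : Int)) (N : Int) []
  let S := (List.range N).foldl
    (fun S (i : Nat) =>
      (PySem.List.pyRange ((i : Int) + 1) (PySem.List.pyGetD ends (i : Int) 0 + 1) 1).foldl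
        (fun S j => S.insert (PySem.Str.slice P (some (i : Int)) (some j)) 1) S)
    PySem.Dict.empty
  ((S.size : Int), S.items)

-- ===== PRECONDITION & SPEC =====
-- Pre_ excludes exactly the strings containing a character with code < 71 or > 122: there
-- pos = ord(c) - 97 falls outside [-26, 25] and both A and B raise IndexError.
def Pre_distinctSubstring (P : String) : Prop :=
  (P.toList.all (fun c => 71 ≤ c.toNat && c.toNat ≤ 122)) = true
instance (P : String) : Decidable (Pre_distinctSubstring P) := by
  unfold Pre_distinctSubstring; infer_instance
def pvWitness_distinctSubstring : String := "abcaG"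
def Spec_distinctSubstring (P : String) (out : Int × (List (String × Int))) : Prop :=
  out = distinctSubstring_alt P
instance (P : String) (out : Int × (List (String × Int))) : Decidable (Spec_distinctSubstring P out) := by
  unfold Spec_distinctSubstring; infer_instance

-- ===== CLAIM (what is proved, stated in full; the proofs are below) =====
def Claim_equal_distinctSubstring : Prop :=
  ∀ (P : String), Dom_distinctSubstring P → Pre_distinctSubstring P →
    Spec_distinctSubstring P (distinctSubstring P)

-- ===== LEMMAS AND PROOFS =====

-- the slot of the 26-cell array a character with code in [71,122] lands on after
-- Python's negative-index wrap: (code - 97) mod 26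
def pvSlot (c : Char) : Nat := (c.toNat + 7) % 26

-- length of the longest duplicate-free prefix, by the next-occurrence recurrence
def pvG : List Nat → Nat
  | [] => 0
  | a :: t => min (pvG t) (List.idxOf a t) + 1

-- exclusive end of the maximal distinct-slot window starting at i
def pvE (L : List Char) (i : Nat) : Nat := i + pvG ((L.drop i).map pvSlot)

lemma pvG_le_length (l : List Nat) : pvG l ≤ l.length := by
  induction l with
  | nil => simp [pvG]
  | cons a t ih =>
    simp only [pvG, List.length_cons]
    have := List.idxOf_le_length (a := a) (l := t)
    omega

lemma pv_mem_take_iff_idxOf_lt {α : Type} [DecidableEq α] (l : List α) (a : α) (m : Nat)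
    (hm : m ≤ l.length) : a ∈ l.take m ↔ l.idxOf a < m := by
  induction l generalizing m with
  | nil => simp at hm; simp [hm]
  | cons b t ih =>
    cases m with
    | zero => simp
    | succ m =>
      by_cases hab : a = b
      · subst hab; simp [List.idxOf_cons_self]
      · simp only [List.take_succ_cons, List.mem_cons, hab, false_or,
          List.idxOf_cons_ne _ (by simpa using (Ne.symm hab))]
        rw [ih m (by simpa using hm)]
        omega

lemma pv_take_nodup_iff (l : List Nat) (m : Nat) (hm : m ≤ l.length) :
    (l.take m).Nodup ↔ m ≤ pvG l := by
  induction l generalizing m with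
  | nil => simp at hm; simp [hm, pvG]
  | cons a t ih =>
    cases m with
    | zero => simp [pvG]
    | succ m =>
      have hm' : m ≤ t.length := by simpa using hm
      simp only [List.take_succ_cons, List.nodup_cons, pvG]
      rw [ih m hm', pv_mem_take_iff_idxOf_lt t a m hm']
      omega

lemma pvE_le_length (L : List Char) (i : Nat) (hi : i ≤ L.length) : pvE L i ≤ L.length := by
  have h := pvG_le_length ((L.drop i).map pvSlot)
  simp only [List.length_map, List.length_drop] at h
  unfold pvE; omega

lemma pv_le_pvE (L : List Char) (i j : Nat) (hij : i ≤ j) (hjN : j ≤ L.length)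
    (hnd : (((L.drop i).take (j - i)).map pvSlot).Nodup) : j ≤ pvE L i := by
  have hnd' : (((L.drop i).map pvSlot).take (j - i)).Nodup := by
    rwa [← List.map_take]
  have := (pv_take_nodup_iff ((L.drop i).map pvSlot) (j - i)
    (by simp [List.length_drop]; omega)).mp hnd'
  unfold pvE; omega

-- index-wrap lemmas: for a code in [71,122], pos = code - 97 reads/writes cell pvSlot c
lemma pv_wrap_get {α : Type} (xs : List α) (hlen : xs.length = 26) (c : Char)
    (h1 : 71 ≤ c.toNat) (h2 : c.toNat ≤ 122) (d : α) :
    PySem.List.pyGetD xs ((c.toNat : Int) - 97) d = xs.getD (pvSlot c) d := by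
  simp only [PySem.List.pyGetD, PySem.List.pyGet?, PySem.List.pyIdx?, hlen, pvSlot]
  by_cases h : (0:Int) ≤ (c.toNat : Int) - 97
  · rw [if_pos h, if_pos (by omega)]
    have : ((c.toNat : Int) - 97).toNat = (c.toNat + 7) % 26 := by omega
    simp [this, List.getD]
  · rw [if_neg h, if_pos (by omega)]
    have h26 : 26 - (97 - c.toNat) = (c.toNat + 7) % 26 := by omega
    simp [List.getD]
    simp [h26]

lemma pv_wrap_set {α : Type} (xs : List α) (hlen : xs.length = 26) (c : Char)
    (h1 : 71 ≤ c.toNat) (h2 : c.toNat ≤ 122) (v : α) :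
    PySem.List.pySetD xs ((c.toNat : Int) - 97) v = xs.set (pvSlot c) v := by
  simp only [PySem.List.pySetD, PySem.List.pySet?, PySem.List.pyIdx?, hlen, pvSlot]
  by_cases h : (0:Int) ≤ (c.toNat : Int) - 97
  · rw [if_pos h, if_pos (by omega)]
    have : ((c.toNat : Int) - 97).toNat = (c.toNat + 7) % 26 := by omega
    simp [this]
  · rw [if_neg h, if_pos (by omega)]
    have h26 : 26 - (97 - c.toNat) = (c.toNat + 7) % 26 := by omega
    simp
    simp [h26]

lemma pvSlot_lt (c : Char) : pvSlot c < 26 := Nat.mod_lt _ (by omega)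

-- the common emission both ports reduce to
def pvEmit (L : List Char) (i lo n : Nat) (S : PySem.Dict String Int) : PySem.Dict String Int :=
  (List.range' lo n).foldl
    (fun S j' => S.insert (String.ofList ((L.drop i).take (j' - i))) 1) S

def pvRef (P : String) : Int × (List (String × Int)) :=
  let L := P.toList
  let S := (List.range L.length).foldl
    (fun S i => pvEmit L i (i + 1) (pvE L i - i) S) PySem.Dict.empty
  ((S.size : Int), S.items)

lemma pv_getD_set {α : Type} (l : List α) (n : Nat) (v d : α) (p : Nat)
    (hp : p < l.length) :
    (l.set n v).getD p d = if p = n then v else l.getD p d := by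
  rw [List.getD_eq_getElem?_getD, List.getD_eq_getElem?_getD,
    List.getElem?_eq_getElem (by simpa using hp), List.getElem?_eq_getElem hp]
  rw [Option.getD_some, Option.getD_some, List.getElem_set]
  split_ifs with h1 h2 h2 <;> first | rfl | (exfalso; omega)

lemma pv_pyRange_natCast (a b : Nat) (h : a ≤ b) :
    PySem.List.pyRange (a:Int) (b:Int) 1 = List.map (fun n : Nat => (n:Int)) (List.range' a (b-a)) := by
  simp only [PySem.List.pyRange, List.range'_eq_map_range]
  norm_num
  rcases Nat.eq_or_lt_of_le h with h'|h'
  · simp [h']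
  · rw [if_pos (by exact_mod_cast h')]
    apply List.map_congr_left
    intro k hk
    simp

lemma pv_take_ext (L : List Char) (i j : Nat) (hij : i ≤ j) (hj : j < L.length) :
    (L.drop i).take (j + 1 - i) = (L.drop i).take (j - i) ++ [L[j]] := by
  have h1 : j + 1 - i = (j - i) + 1 := by omega
  have h2 : (L.drop i)[j - i]? = some L[j] := by
    rw [List.getElem?_eq_getElem (by simp [List.length_drop]; omega)]
    congr 1
    rw [List.getElem_drop]
    congr 1
    omega
  rw [h1, List.take_add_one, h2]
  rfl

lemma pvE_succ (L : List Char) (i : Nat) (h : i < L.length) :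
    pvE L i = min (pvE L (i+1))
      (i + 1 + List.idxOf (pvSlot L[i]) ((L.drop (i+1)).map pvSlot)) := by
  unfold pvE
  rw [List.drop_eq_getElem_cons h, List.map_cons]
  simp only [pvG]
  omega

lemma pvE_ge (L : List Char) (i : Nat) : i ≤ pvE L i := by unfold pvE; omega

-- A-side characterisation of the inner loop
lemma pvAinner_eq (L : List Char) (hpre : ∀ c ∈ L, 71 ≤ c.toNat ∧ c.toNat ≤ 122)
    (i : Nat) : ∀ (n j : Nat) (freq : List Bool) (S : PySem.Dict String Int),
    L.length - j = n → i ≤ j → j ≤ L.length →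
    (((L.drop i).take (j - i)).map pvSlot).Nodup →
    freq.length = 26 →
    (∀ k : Nat, k < 26 → freq.getD k false
      = decide (k ∈ ((L.drop i).take (j - i)).map pvSlot)) →
    pvAinner L L.length j freq ((L.drop i).take (j - i)) S
      = pvEmit L i (j + 1) (pvE L i - j) S := by
  intro n
  induction n with
  | zero =>
    intro j freq S hn hij hjN hnd hflen hf
    have hj : j = L.length := by omega
    rw [pvAinner, dif_neg (by omega)]
    have h1 : j ≤ pvE L i := pv_le_pvE L i j hij hjN hnd
    have h2 : pvE L i ≤ L.length := pvE_le_length L i (by omega)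
    have h0 : pvE L i - j = 0 := by omega
    rw [h0]
    simp [pvEmit]
  | succ n ih =>
    intro j freq S hn hij hjN hnd hflen hf
    have hjN' : j < L.length := by omega
    obtain ⟨h71, h122⟩ := hpre L[j] (List.getElem_mem hjN')
    have hslot := pvSlot_lt L[j]
    rw [pvAinner, dif_pos hjN']
    have hc : PySem.List.pyGetD L (↑j) ' ' = L[j] := by
      simp [List.getD_eq_getElem?_getD, List.getElem?_eq_getElem hjN']
    simp only [hc]
    rw [pv_wrap_get freq hflen L[j] h71 h122, hf (pvSlot L[j]) hslot]
    have hext := pv_take_ext L i j hij hjN'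
    by_cases hmem : pvSlot L[j] ∈ ((L.drop i).take (j - i)).map pvSlot
    · rw [if_pos (by simpa using hmem)]
      -- the scan breaks here: the window ends exactly at j
      have h1 : j ≤ pvE L i := pv_le_pvE L i j hij hjN hnd
      have h2 : ¬ (j + 1 ≤ pvE L i) := by
        intro hle
        have hlen : j + 1 - i ≤ ((L.drop i).map pvSlot).length := by
          simp [List.length_drop]; omega
        have hnd2 : (((L.drop i).map pvSlot).take (j + 1 - i)).Nodup :=
          (pv_take_nodup_iff _ _ hlen).mpr (by unfold pvE at hle; omega)
        rw [← List.map_take, hext, List.map_append] at hnd2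
        simp [List.nodup_append] at hnd2
        have hmem' : pvSlot L[j] ∈ ((List.map pvSlot L).drop i).take (j - i) := by
          simpa [List.map_take, List.map_drop] using hmem
        exact hnd2.2 _ hmem' rfl
      have h0 : pvE L i - j = 0 := by omega
      rw [h0]
      simp [pvEmit]
    · rw [if_neg (by simpa using hmem)]
      rw [pv_wrap_set freq hflen L[j] h71 h122]
      have hseg : (L.drop i).take (j - i) ++ [L[j]] = (L.drop i).take (j + 1 - i) := hext.symm
      have hnd2 : (((L.drop i).take (j + 1 - i)).map pvSlot).Nodup := by
        rw [hext, List.map_append, List.nodup_append]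
        refine ⟨hnd, List.nodup_singleton _, ?_⟩
        have hmem2 : pvSlot L[j] ∉ ((List.map pvSlot L).drop i).take (j - i) := by
          simpa [List.map_take, List.map_drop] using hmem
        simp only [List.map_take, List.map_drop]
        simpa using fun a ha (hq : a = pvSlot L[j]) => hmem2 (hq ▸ ha)
      have hstep : j + 1 ≤ pvE L i :=
        pv_le_pvE L i (j + 1) (by omega) (by omega) hnd2
      rw [hseg]
      rw [ih (j + 1) (freq.set (pvSlot L[j]) true) _ (by omega) (by omega) (by omega) hnd2
        (by simpa using hflen) ?_]
      · have hsplit : pvE L i - j = (pvE L i - (j + 1)) + 1 := by omega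
        rw [hsplit]
        unfold pvEmit
        rw [List.range'_succ]
        simp only [List.foldl_cons]
      · intro k hk
        rw [pv_getD_set freq (pvSlot L[j]) true false k (by omega)]
        rw [hext, List.map_append]
        by_cases hks : k = pvSlot L[j]
        · rw [if_pos hks, hks]
          simp
        · rw [if_neg hks, hf k hk]
          simp [hks]

-- B-side characterisation of the backward pass
lemma pvBback_eq (L : List Char) (hpre : ∀ c ∈ L, 71 ≤ c.toNat ∧ c.toNat ≤ 122)
    (k : Nat) (hk : k ≤ L.length)
    (seen : List Int) (hslen : seen.length = 26)
    (hseen : ∀ p : Nat, p < 26 →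
      seen.getD p 0 = (k : Int) + List.idxOf p ((L.drop k).map pvSlot))
    (ends : List Int) :
    pvBback L k seen ((pvE L k : Nat) : Int) ends
      = ((List.range k).map (fun i => ((pvE L i : Nat) : Int))) ++ ends := by
  induction k generalizing seen ends with
  | zero => simp [pvBback]
  | succ i ih =>
    have hiN : i < L.length := hk
    obtain ⟨h71, h122⟩ := hpre L[i] (List.getElem_mem hiN)
    have hslot := pvSlot_lt L[i]
    simp only [pvBback]
    have hc : PySem.List.pyGetD L (↑i) ' ' = L[i] := by
      simp [List.getD_eq_getElem?_getD, List.getElem?_eq_getElem hiN]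
    rw [hc, pv_wrap_get seen hslen L[i] h71 h122,
      pv_wrap_set seen hslen L[i] h71 h122,
      hseen (pvSlot L[i]) hslot]
    have hmin : min ((pvE L (i+1) : Nat) : Int)
        (((i+1 : Nat) : Int) + (List.idxOf (pvSlot L[i]) ((L.drop (i+1)).map pvSlot) : Nat))
        = ((pvE L i : Nat) : Int) := by
      rw [pvE_succ L i hiN]; push_cast; omega
    rw [hmin]
    rw [ih (by omega) (seen.set (pvSlot L[i]) (i : Int)) (by simpa using hslen) ?_ _]
    · rw [List.range_succ]
      simp
    · intro p hp
      rw [pv_getD_set seen (pvSlot L[i]) _ 0 p (by omega)]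
      rw [List.drop_eq_getElem_cons hiN, List.map_cons, List.idxOf_cons]
      by_cases hps : p = pvSlot L[i]
      · rw [if_pos hps]
        have : (pvSlot L[i] == p) = true := by simp [hps]
        rw [this]
        simp
      · rw [if_neg hps]
        have : (pvSlot L[i] == p) = false := by simp; exact fun h => hps h.symm
        rw [this]
        rw [hseen p hp]
        push_cast
        simp [Nat.cast_add]
        omega

lemma pvA_eq_ref (P : String) (hpre : Pre_distinctSubstring P) :
    distinctSubstring P = pvRef P := by
  have hpre' : ∀ c ∈ P.toList, 71 ≤ c.toNat ∧ c.toNat ≤ 122 := by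
    intro c hc
    have := List.all_eq_true.mp hpre c hc
    simpa using this
  unfold distinctSubstring pvRef
  have hfold : (List.range P.toList.length).foldl
      (fun S i => pvAinner P.toList P.toList.length i (List.replicate 26 false) [] S)
      PySem.Dict.empty
      = (List.range P.toList.length).foldl
      (fun S i => pvEmit P.toList i (i + 1) (pvE P.toList i - i) S) PySem.Dict.empty := by
    apply PySem.List.foldl_congr_mem
    intro S i hi
    rw [List.mem_range] at hi
    have h0 : (P.toList.drop i).take (i - i) = ([] : List Char) := by simp
    have := pvAinner_eq P.toList hpre' i (P.toList.length - i) i (List.replicate 26 false) S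
      rfl (le_refl i) (by omega) (by rw [h0]; simp) (by simp)
      (by intro k hk; rw [List.getD_replicate _ (by omega)]; rw [h0]; simp)
    rw [h0] at this
    exact this
  exact congrArg (fun S : PySem.Dict String Int => ((S.size : Int), S.items)) hfold

lemma pvB_eq_ref (P : String) (hpre : Pre_distinctSubstring P) :
    distinctSubstring_alt P = pvRef P := by
  have hpre' : ∀ c ∈ P.toList, 71 ≤ c.toNat ∧ c.toNat ≤ 122 := by
    intro c hc
    have := List.all_eq_true.mp hpre c hc
    simpa using this
  unfold distinctSubstring_alt pvRef
  have hEN : pvE P.toList P.toList.length = P.toList.length := by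
    unfold pvE
    rw [List.drop_length]
    simp [pvG]
  have hends : pvBback P.toList P.toList.length
      (List.replicate 26 (P.toList.length : Int)) ((P.toList.length : Nat) : Int) []
      = (List.range P.toList.length).map (fun i => ((pvE P.toList i : Nat) : Int)) := by
    have h := pvBback_eq P.toList hpre' P.toList.length (le_refl _)
      (List.replicate 26 (P.toList.length : Int)) (by simp)
      (by intro p hp; rw [List.getD_replicate _ (by omega), List.drop_length]; simp) []
    rw [hEN] at h
    simpa using h
  have hfold : (List.range P.toList.length).foldl
      (fun S (i : Nat) =>
        (PySem.List.pyRange ((i : Int) + 1)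
          (PySem.List.pyGetD (pvBback P.toList P.toList.length
            (List.replicate 26 (P.toList.length : Int)) ((P.toList.length : Nat) : Int) [])
            (i : Int) 0 + 1) 1).foldl
          (fun S j => S.insert (PySem.Str.slice P (some (i : Int)) (some j)) 1) S)
      PySem.Dict.empty
      = (List.range P.toList.length).foldl
      (fun S i => pvEmit P.toList i (i + 1) (pvE P.toList i - i) S) PySem.Dict.empty := by
    rw [hends]
    apply PySem.List.foldl_congr_mem
    intro S i hi
    rw [List.mem_range] at hi
    have hge := pvE_ge P.toList i
    have hgd : PySem.List.pyGetD
        ((List.range P.toList.length).map (fun i => ((pvE P.toList i : Nat) : Int))) (↑i) 0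
        = ((pvE P.toList i : Nat) : Int) := by
      rw [PySem.List.pyGetD_natCast]
      rw [List.getD_eq_getElem?_getD, List.getElem?_eq_getElem (by simpa using hi)]
      simp
    rw [hgd]
    have hcast1 : (i : Int) + 1 = ((i + 1 : Nat) : Int) := by push_cast; ring
    have hcast2 : ((pvE P.toList i : Nat) : Int) + 1 = ((pvE P.toList i + 1 : Nat) : Int) := by
      push_cast; ring
    rw [hcast1, hcast2, pv_pyRange_natCast (i + 1) (pvE P.toList i + 1) (by omega)]
    have hsub : pvE P.toList i + 1 - (i + 1) = pvE P.toList i - i := by omega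
    rw [hsub, List.foldl_map]
    unfold pvEmit
    apply PySem.List.foldl_congr_mem
    intro S' j' _
    have hkey : PySem.Str.slice P (some (i : Int)) (some ((j' : Nat) : Int))
        = String.ofList ((P.toList.drop i).take (j' - i)) := by
      simp [PySem.Str.slice, PySem.Chars.slice, PySem.List.slice_natCast]
    rw [hkey]
  exact congrArg (fun S : PySem.Dict String Int => ((S.size : Int), S.items)) hfold

-- ===== VERDICT (by name: the statement is the Claim_ definition above) =====
theorem distinctSubstring_spec : Claim_equal_distinctSubstring := by
  intro P _ hpre
  unfold Spec_distinctSubstring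
  rw [pvA_eq_ref P hpre, pvB_eq_ref P hpre]
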